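-- pv_equiv track=rewrite | github.com/keithyin/mynotes | MachineLearning/NLP/cmu-nlp-notes/nn4nlp-code/learn_dynet/dynamic.py | create_xor_instances
-- ===== SOURCE A (Python) =====
-- def create_xor_instances(num_rounds=2000):
--     questions = []
--     answers = []
--     for round in range(num_rounds):
--         for x1 in 0,1:
--             for x2 in 0,1:
--                 answer = 0 if x1==x2 else 1
--                 questions.append((x1,x2))
--                 answers.append(answer)
--     return questions, answers
-- ===== SOURCE B (Python) =====
-- def create_xor_instances(num_rounds=2000):
--     questions_base = [(0, 0), (0, 1), (1, 0), (1, 1)]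
--     answers_base = [0, 1, 1, 0]
--     return questions_base * num_rounds, answers_base * num_rounds
-- ===== Notes on version B (the rewrite author's own statement) =====
-- stated objective: simpler
-- what changed: Replaced the triple nested loop (rounds x x1 x2) with a literal one-period table of the four XOR cases replicated num_rounds times by list multiplication.
import Mathlib
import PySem

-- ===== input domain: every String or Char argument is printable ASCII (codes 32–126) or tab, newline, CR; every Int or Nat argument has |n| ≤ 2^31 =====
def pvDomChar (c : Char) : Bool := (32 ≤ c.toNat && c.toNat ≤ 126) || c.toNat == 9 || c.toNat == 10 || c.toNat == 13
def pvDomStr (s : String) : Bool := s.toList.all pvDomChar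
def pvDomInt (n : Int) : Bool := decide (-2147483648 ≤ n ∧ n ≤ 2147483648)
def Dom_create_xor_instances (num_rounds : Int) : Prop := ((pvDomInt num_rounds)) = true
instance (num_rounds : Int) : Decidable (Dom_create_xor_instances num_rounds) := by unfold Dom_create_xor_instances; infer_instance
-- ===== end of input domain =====

-- B replaces A's triple nested loop with a literal one-period table of the four XOR
-- cases replicated num_rounds times (list multiplication); objective: simpler.

-- ===== PORT A =====
def create_xor_instances (num_rounds : Int) : (List (Int × Int)) × List Int :=
  (PySem.List.pyRange 0 num_rounds 1).foldl
    (fun st _round =>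
      ([0, 1] : List Int).foldl
        (fun st x1 =>
          ([0, 1] : List Int).foldl
            (fun st x2 =>
              let answer : Int := if x1 == x2 then 0 else 1
              (st.1 ++ [(x1, x2)], st.2 ++ [answer]))
            st)
        st)
    ([], [])

-- ===== PORT B =====
def create_xor_instances_alt (num_rounds : Int) : (List (Int × Int)) × List Int :=
  let questions_base : List (Int × Int) := [(0, 0), (0, 1), (1, 0), (1, 1)]
  let answers_base : List Int := [0, 1, 1, 0]
  (PySem.List.pyRepeat questions_base num_rounds, PySem.List.pyRepeat answers_base num_rounds)

-- ===== PRECONDITION & SPEC =====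
def Spec_create_xor_instances (num_rounds : Int) (out : (List (Int × Int)) × List Int) : Prop := out = create_xor_instances_alt num_rounds
instance (num_rounds : Int) (out : (List (Int × Int)) × List Int) : Decidable (Spec_create_xor_instances num_rounds out) := by unfold Spec_create_xor_instances; infer_instance

-- ===== CLAIM (what is proved, stated in full; the proofs are below) =====
def Claim_equal_create_xor_instances : Prop := ∀ (num_rounds : Int), Dom_create_xor_instances num_rounds → Spec_create_xor_instances num_rounds (create_xor_instances num_rounds)

-- ===== LEMMAS AND PROOFS =====

theorem xor_nat_case (n : Nat) :
    create_xor_instances (n : Int) = create_xor_instances_alt (n : Int) := by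
  induction n with
  | zero => decide
  | succ n ih =>
    unfold create_xor_instances create_xor_instances_alt PySem.List.pyRepeat at *
    have hr : PySem.List.pyRange 0 ((n : Int) + 1) 1
        = PySem.List.pyRange 0 (n : Int) 1 ++ [(n : Int)] :=
      PySem.List.pyRange_one_succ_right (by positivity)
    have hcast : ((n + 1 : Nat) : Int) = (n : Int) + 1 := by push_cast; ring
    have htn : ((n : Int) + 1).toNat = n + 1 := by omega
    rw [hcast, hr, List.foldl_append, ih, htn]
    simp [List.foldl, List.replicate_succ' (n := n)]

-- ===== VERDICT (by name: the statement is the Claim_ definition above) =====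
theorem create_xor_instances_spec : Claim_equal_create_xor_instances := by
  intro num_rounds _
  unfold Spec_create_xor_instances
  by_cases h : 0 ≤ num_rounds
  · have := xor_nat_case num_rounds.toNat
    rwa [Int.toNat_of_nonneg h] at this
  · have hr : PySem.List.pyRange 0 num_rounds 1 = [] :=
      PySem.List.pyRange_one_eq_nil (by omega)
    have htn : num_rounds.toNat = 0 := by omega
    simp [create_xor_instances, create_xor_instances_alt, PySem.List.pyRepeat, hr, htn]
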